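-- pv_equiv track=rewrite | github.com/pypi-data/pypi-mirror-403 | packages/cubexpress/cubexpress-0.1.36.tar.gz/cubexpress-0.1.36/cubexpress/download/tiling.py | _make_horizontal_strips
-- ===== SOURCE A (Python) =====
-- def _make_horizontal_strips(width: int, height: int, max_strip_height: int) -> list[tuple[int, int, int, int]]:
--     """Create horizontal strips (full width)."""
--     tiles = []
--     y = 0
--
--     while y < height:
--         h = min(max_strip_height, height - y)
--         tiles.append((0, y, width, h))
--         y += h
--
--     return tiles
-- ===== SOURCE B (Python) =====
-- def _make_horizontal_strips(width: int, height: int, max_strip_height: int) -> list[tuple[int, int, int, int]]: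
--     """Create horizontal strips (full width)."""
--     if height <= 0:
--         return []
--     full, rem = divmod(height, max_strip_height)
--     tiles = [(0, i * max_strip_height, width, max_strip_height) for i in range(full)]
--     if rem:
--         tiles.append((0, full * max_strip_height, width, rem))
--     return tiles
-- ===== Notes on version B (the rewrite author's own statement) =====
-- stated objective: alternative
-- what changed: Instead of stepping y and clamping each strip with min, B computes the strip count in closed form with divmod(height, max_strip_height), emits the full-height strips from their indices, and appends one remainder strip if divmod left a nonzero remainder.
import Mathlib
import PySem

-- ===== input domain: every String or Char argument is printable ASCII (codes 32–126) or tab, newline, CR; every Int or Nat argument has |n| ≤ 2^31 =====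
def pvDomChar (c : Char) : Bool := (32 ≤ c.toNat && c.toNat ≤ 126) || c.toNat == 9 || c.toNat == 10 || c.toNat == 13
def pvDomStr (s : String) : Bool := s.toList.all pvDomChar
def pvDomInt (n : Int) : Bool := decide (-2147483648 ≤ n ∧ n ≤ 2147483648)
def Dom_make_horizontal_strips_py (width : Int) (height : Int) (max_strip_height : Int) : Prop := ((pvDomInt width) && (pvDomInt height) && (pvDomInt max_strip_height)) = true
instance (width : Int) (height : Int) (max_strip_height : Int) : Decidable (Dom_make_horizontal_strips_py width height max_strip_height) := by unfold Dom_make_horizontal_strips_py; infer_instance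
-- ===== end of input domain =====

-- B replaces A's stepping-and-clamping while loop by a closed-form divmod count:
-- `full` whole strips built from their indices plus one remainder strip (alternative; same cost).

-- ===== PORT A =====
-- the while-loop of A: if the clamped height h is not positive and y < height, Python
-- loops forever; the guard `0 < h` only makes the recursion total (those inputs lie outside Pre_).
def pvAStripLoop (width height max_strip_height : Int) (y : Int)
    (tiles : List (Int × Int × Int × Int)) : List (Int × Int × Int × Int) :=
  if _hy : y < height then
    let h := min max_strip_height (height - y)
    if _hpos : 0 < h then
      pvAStripLoop width height max_strip_height (y + h) (tiles ++ [(0, y, width, h)])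
    else tiles
  else tiles
termination_by (height - y).toNat
decreasing_by omega

def make_horizontal_strips_py (width : Int) (height : Int) (max_strip_height : Int) : List (Int × Int × Int × Int) :=
  pvAStripLoop width height max_strip_height 0 []

-- ===== PORT B =====
def make_horizontal_strips_py_alt (width : Int) (height : Int) (max_strip_height : Int) : List (Int × Int × Int × Int) :=
  if height ≤ 0 then []
  else
    let full := PySem.Int.floordiv height max_strip_height
    let rem := PySem.Int.mod height max_strip_height
    let tiles := (PySem.List.pyRange 0 full 1).map
      (fun i => (0, i * max_strip_height, width, max_strip_height))
    if rem ≠ 0 then tiles ++ [(0, full * max_strip_height, width, rem)] else tiles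

-- ===== PRECONDITION & SPEC =====
-- Pre_ excludes only max_strip_height ≤ 0 together with height > 0: exactly the inputs
-- on which A's while-loop never terminates (no exception, no value).
def Pre_make_horizontal_strips_py (width : Int) (height : Int) (max_strip_height : Int) : Prop :=
  0 < max_strip_height ∨ height ≤ 0
instance (width : Int) (height : Int) (max_strip_height : Int) : Decidable (Pre_make_horizontal_strips_py width height max_strip_height) := by unfold Pre_make_horizontal_strips_py; infer_instance

def pvWitness_make_horizontal_strips_py : Int × Int × Int := (10, 10, 3)

def Spec_make_horizontal_strips_py (width : Int) (height : Int) (max_strip_height : Int) (out : List (Int × Int × Int × Int)) : Prop := out = make_horizontal_strips_py_alt width height max_strip_height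
instance (width : Int) (height : Int) (max_strip_height : Int) (out : List (Int × Int × Int × Int)) : Decidable (Spec_make_horizontal_strips_py width height max_strip_height out) := by unfold Spec_make_horizontal_strips_py; infer_instance

-- ===== CLAIM =====
def Claim_equal_make_horizontal_strips_py : Prop := ∀ (width : Int) (height : Int) (max_strip_height : Int), Dom_make_horizontal_strips_py width height max_strip_height → Pre_make_horizontal_strips_py width height max_strip_height → Spec_make_horizontal_strips_py width height max_strip_height (make_horizontal_strips_py width height max_strip_height)

-- ===== LEMMAS AND PROOFS =====

-- A's loop, started at y with exactly n full strips and remainder r left, produces those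
-- strips in order.
lemma pvLoopStrips (w m : Int) (hm : 0 < m) (n : ℕ) (r : Int) (hr0 : 0 ≤ r) (hrm : r < m) :
    ∀ (y : Int) (tiles : List (Int × Int × Int × Int)),
      pvAStripLoop w (y + n * m + r) m y tiles =
        tiles ++ (List.range n).map (fun k : ℕ => ((0 : Int), y + (k : Int) * m, w, m)) ++
          (if r = 0 then [] else [(0, y + n * m, w, r)]) := by
  induction n with
  | zero =>
    intro y tiles
    rw [pvAStripLoop]
    by_cases hr : r = 0
    · subst hr; simp
    · have hy : y < y + ((0 : ℕ) : Int) * m + r := by push_cast; omega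
      rw [dif_pos hy]
      have hmin : min m (y + ((0 : ℕ) : Int) * m + r - y) = r := by push_cast; omega
      rw [hmin, dif_pos (by omega)]
      rw [pvAStripLoop, dif_neg (by push_cast; omega)]
      simp [hr]
  | succ n ih =>
    intro y tiles
    have hnm : (0 : Int) ≤ (n : Int) * m := by positivity
    have hy : y < y + ((n + 1 : ℕ) : Int) * m + r := by push_cast; nlinarith
    rw [pvAStripLoop, dif_pos hy]
    have hmin : min m (y + ((n + 1 : ℕ) : Int) * m + r - y) = m := by
      apply min_eq_left
      push_cast; nlinarith
    rw [hmin, dif_pos hm]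
    have harg : y + ((n + 1 : ℕ) : Int) * m + r = (y + m) + n * m + r := by push_cast; ring
    rw [harg, ih (y + m) (tiles ++ [(0, y, w, m)])]
    rw [List.range_succ_eq_map, List.map_cons, List.map_map]
    simp only [List.append_assoc, List.cons_append, List.nil_append, Nat.cast_zero, zero_mul,
      add_zero]
    refine congrArg (tiles ++ ·) (congrArg (List.cons _) (congrArg₂ (fun (u v : List (Int × Int × Int × Int)) => u ++ v) ?_ ?_))
    · exact List.map_congr_left (fun k _ => by
        simp only [Function.comp]; push_cast; ring_nf)
    · split_ifs with h
      · rfl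
      · congr 2
        push_cast; ring_nf

-- ===== VERDICT =====
theorem make_horizontal_strips_py_spec : Claim_equal_make_horizontal_strips_py := by
  intro width height m _hdom hpre
  unfold Spec_make_horizontal_strips_py make_horizontal_strips_py make_horizontal_strips_py_alt
  by_cases hh : height ≤ 0
  · rw [if_pos hh, pvAStripLoop, dif_neg (by omega)]
  · rw [if_neg hh]
    have hm : 0 < m := by
      rcases hpre with h | h
      · exact h
      · omega
    have hdm := PySem.Int.floordiv_mul_add_mod height m
    have hr0 := PySem.Int.mod_nonneg height hm
    have hrm := PySem.Int.mod_lt height hm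
    set q := PySem.Int.floordiv height m with hq
    set r := PySem.Int.mod height m with hrdef
    have hq0 : 0 ≤ q := by nlinarith
    have hheight : height = 0 + q.toNat * m + r := by
      have : ((q.toNat : Int)) = q := by omega
      rw [this]; omega
    rw [hheight, pvLoopStrips width m hm q.toNat r hr0 hrm 0 []]
    have hrange : PySem.List.pyRange 0 q 1 = (List.range q.toNat).map (fun k : ℕ => ((k : ℕ) : Int)) := by
      rw [PySem.List.pyRange_one, Int.sub_zero]
      exact List.map_congr_left (fun k _ => by simp)
    simp only [hrange, List.map_map, List.nil_append]
    have hqn : ((q.toNat : ℕ) : Int) = q := Int.toNat_of_nonneg hq0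
    rw [hqn]
    simp only [zero_add]
    by_cases hr : r = 0
    · simp [hr]
    · simp [hr]
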